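-- pv_equiv track=rewrite | github.com/page1597/Algorithm | 프로그래머스/2/84512. 모음 사전/모음 사전.py | solution
-- ===== SOURCE A (Python) =====
-- def solution(word):
--     answer = 0
--     vowels = ["A", "E", "I", "O", "U"]
--     orders = [781, 156, 31, 6, 1]
--
--     for i, v in enumerate(word):
--         index = vowels.index(v)
--         answer += orders[i] * index + 1
--     return answer
-- ===== SOURCE B (Python) =====
-- def solution(word):
--     # Enumerate the whole vowel dictionary in lexicographic (DFS) order,
--     # then the answer is simply the position of the word in that list.
--     vowels = ["A", "E", "I", "O", "U"]
--     words = []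
--     def dfs(cur):
--         words.append(cur)
--         if len(cur) == 5:
--             return
--         for v in vowels:
--             dfs(cur + v)
--     dfs("")
--     return words.index(word)
-- ===== Notes on version B (the rewrite author's own statement) =====
-- stated objective: alternative
-- what changed: B generates the whole 3906-word vowel dictionary in lexicographic order by DFS and returns list.index(word), replacing A's positional weighted-sum with the hard-coded weights [781,156,31,6,1].
import Mathlib
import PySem

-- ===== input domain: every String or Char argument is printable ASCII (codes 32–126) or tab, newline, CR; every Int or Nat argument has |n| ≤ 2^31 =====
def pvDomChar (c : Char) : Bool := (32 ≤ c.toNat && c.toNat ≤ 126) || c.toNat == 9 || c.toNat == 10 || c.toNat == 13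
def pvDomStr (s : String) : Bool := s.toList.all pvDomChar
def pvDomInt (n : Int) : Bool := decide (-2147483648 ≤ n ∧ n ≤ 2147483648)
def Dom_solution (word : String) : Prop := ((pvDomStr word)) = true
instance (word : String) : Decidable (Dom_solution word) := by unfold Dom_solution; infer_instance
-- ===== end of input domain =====

-- B enumerates the whole vowel dictionary by DFS and returns the word's position
-- (list.index) instead of A's weighted digit sum — an alternative algorithm.
-- Pre_solution excludes exactly the inputs on which A raises (ValueError/IndexError):
-- words with a non-vowel character or longer than 5.


-- ===== PORT A =====
def vowelsA : List Char := ['A', 'E', 'I', 'O', 'U']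
def ordersA : List Int := [781, 156, 31, 6, 1]

-- the for-loop over enumerate(word); `.getD 0` stands where Python raises
-- ValueError (vowels.index) / IndexError (orders[i]) — those inputs are outside Pre_solution
def solLoopA : Int → List (Int × Char) → Int
  | answer, [] => answer
  | answer, (i, v) :: rest =>
      let index : Int := ((PySem.List.index? vowelsA v).getD 0 : Nat)
      solLoopA (answer + (PySem.List.pyGet? ordersA i).getD 0 * index + 1) rest

def solution (word : String) : Int := solLoopA 0 (PySem.List.enumerate word.toList)

-- ===== PORT B =====
-- words are represented as List Char (exact: Python string equality = char-list equality)
def vowelsB : List Char := ['A', 'E', 'I', 'O', 'U']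

def genWords (cur : List Char) : Nat → List (List Char)
  | 0 => [cur]
  | d + 1 => cur :: vowelsB.flatMap (fun v => genWords (cur ++ [v]) d)

-- `.getD 0` stands where Python raises ValueError (word not in the dictionary) — outside Pre_solution
def solution_alt (word : String) : Int :=
  (((PySem.List.index? (genWords [] 5) word.toList).getD 0 : Nat) : Int)

-- ===== PRECONDITION & SPEC =====
-- excludes exactly the inputs where A raises: a non-vowel character (ValueError) or length > 5 (IndexError)
def Pre_solution (word : String) : Prop :=
  word.toList.length ≤ 5 ∧ word.toList.all (fun c => vowelsA.contains c) = true
instance (word : String) : Decidable (Pre_solution word) := by unfold Pre_solution; infer_instance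

def pvWitness_solution : String := "AEI"

def Spec_solution (word : String) (out : Int) : Prop := out = solution_alt word
instance (word : String) (out : Int) : Decidable (Spec_solution word out) := by unfold Spec_solution; infer_instance

-- ===== CLAIM (what is proved, stated in full; the proofs are below) =====
def Claim_equal_solution : Prop := ∀ (word : String), Dom_solution word → Pre_solution word → Spec_solution word (solution word)

-- ===== LEMMAS AND PROOFS =====

-- size of the dictionary generated below a node with d levels remaining
def szW : Nat → Nat
  | 0 => 1
  | d + 1 => 1 + 5 * szW d

-- rank of a word (as remaining suffix at depth d) in the DFS order
def rankW : List Char → Nat → Nat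
  | [], _ => 0
  | c :: w, d + 1 => 1 + ((PySem.List.index? vowelsA c).getD 0) * szW d + rankW w d
  | _ :: _, 0 => 0

lemma genWords_length (d : Nat) : ∀ cur, (genWords cur d).length = szW d := by
  induction d with
  | zero => intro cur; rfl
  | succ d ih =>
      intro cur
      simp [genWords, vowelsB, List.flatMap_cons, ih, szW]
      omega

lemma genWords_shape (d : Nat) : ∀ cur x, x ∈ genWords cur d → ∃ s, x = cur ++ s := by
  induction d with
  | zero =>
      intro cur x hx
      simp [genWords] at hx
      exact ⟨[], by simp [hx]⟩
  | succ d ih =>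
      intro cur x hx
      simp [genWords] at hx
      rcases hx with h | ⟨v, _, hv⟩
      · exact ⟨[], by simp [h]⟩
      · rcases ih (cur ++ [v]) x hv with ⟨s, hs⟩
        exact ⟨v :: s, by simp [hs]⟩

lemma not_mem_genWords_of_ne (d : Nat) (cur : List Char) (v c : Char) (w : List Char)
    (hvc : v ≠ c) : (cur ++ c :: w) ∉ genWords (cur ++ [v]) d := by
  intro hmem
  rcases genWords_shape d (cur ++ [v]) _ hmem with ⟨s, hs⟩
  rw [List.append_assoc] at hs
  have := List.append_cancel_left hs
  simp at this
  exact hvc this.1.symm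

lemma index?_append_of_not_mem {α : Type} [BEq α] [LawfulBEq α] (l : List α) (t : List α) (v : α)
    (h : v ∉ l) : PySem.List.index? (l ++ t) v = (PySem.List.index? t v).map (· + l.length) := by
  induction l with
  | nil => simp
  | cons x l ih =>
      have hx : x ≠ v := by intro he; exact h (by simp [he])
      rw [List.cons_append, PySem.List.index?_cons_of_ne _ hx,
          ih (by intro hm; exact h (List.mem_cons_of_mem _ hm))]
      cases PySem.List.index? t v <;> simp <;> omega

-- position of the target word inside the flatMap of sibling subtrees
lemma index?_flatMap_genWords (vs : List Char) (cur : List Char) (d : Nat) (w : List Char)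
    (c : Char) (hc : c ∈ vs) (r : Nat)
    (h : PySem.List.index? (genWords (cur ++ [c]) d) (cur ++ c :: w) = some r) :
    PySem.List.index? (vs.flatMap (fun v => genWords (cur ++ [v]) d)) (cur ++ c :: w)
      = some (((PySem.List.index? vs c).getD 0) * szW d + r) := by
  induction vs with
  | nil => simp at hc
  | cons v vs ih =>
      by_cases hvc : v = c
      · subst hvc
        rw [List.flatMap_cons,
            PySem.List.index?_append_of_mem _
              ((PySem.List.index?_isSome_iff _ _).mp (by rw [h]; rfl)), h,
            PySem.List.index?_cons_self]
        simp
      · have hc' : c ∈ vs := by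
          rcases List.mem_cons.mp hc with h1 | h1
          · exact absurd h1.symm hvc
          · exact h1
        rw [List.flatMap_cons,
            index?_append_of_not_mem _ _ _ (not_mem_genWords_of_ne d cur v c w hvc),
            ih hc', PySem.List.index?_cons_of_ne _ hvc, genWords_length]
        rcases Option.isSome_iff_exists.mp ((PySem.List.index?_isSome_iff _ _).mpr hc') with ⟨k, hk⟩
        simp only [PySem.List.index?_eq_idxOf?] at hk ⊢
        rw [hk]
        simp
        ring

lemma index?_genWords (d : Nat) : ∀ (cur w : List Char), w.length ≤ d →
    (∀ c ∈ w, c ∈ vowelsA) →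
    PySem.List.index? (genWords cur d) (cur ++ w) = some (rankW w d) := by
  induction d with
  | zero =>
      intro cur w hlen _
      have : w = [] := List.eq_nil_of_length_eq_zero (Nat.le_zero.mp hlen)
      subst this
      simp only [genWords, rankW, List.append_nil, PySem.List.index?_cons_self]
  | succ d ih =>
      intro cur w hlen hv
      cases w with
      | nil => simp only [genWords, rankW, List.append_nil, PySem.List.index?_cons_self]
      | cons c w' =>
          have hne : cur ≠ cur ++ c :: w' := by
            intro h
            have := congrArg List.length h
            simp at this
          have hcv : c ∈ vowelsA := hv c (by simp)
          have hrec := ih (cur ++ [c]) w' (by simpa using Nat.succ_le_succ_iff.mp hlen)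
            (fun x hx => hv x (by simp [hx]))
          rw [List.append_assoc] at hrec
          rw [genWords, PySem.List.index?_cons_of_ne _ hne,
              index?_flatMap_genWords vowelsB cur d w' c hcv _ hrec,
              show vowelsB = vowelsA from rfl]
          simp [rankW]
          ring

lemma solLoopA_rank : ∀ (w : List Char) (d : Nat) (acc : Int), w.length ≤ d → d ≤ 5 →
    (∀ c ∈ w, c ∈ vowelsA) →
    solLoopA acc (PySem.List.enumerate w ((5 - d : Nat) : Int)) = acc + (rankW w d : Int) := by
  intro w
  induction w with
  | nil => intro d acc _ _ _; simp [PySem.List.enumerate_nil, solLoopA, rankW]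
  | cons c w' ih =>
      intro d acc hlen hd5 hv
      obtain ⟨e, rfl⟩ : ∃ e, d = e + 1 := by
        cases d with
        | zero => simp at hlen
        | succ e => exact ⟨e, rfl⟩
      have hlen' : w'.length ≤ e := by simpa using Nat.succ_le_succ_iff.mp hlen
      have hv' : ∀ x ∈ w', x ∈ vowelsA := fun x hx => hv x (by simp [hx])
      have he4 : e ≤ 4 := by omega
      rw [PySem.List.enumerate_cons]
      simp only [solLoopA]
      have hstart : ((5 - (e + 1) : Nat) : Int) + 1 = ((5 - e : Nat) : Int) := by omega
      have horder : (PySem.List.pyGet? ordersA ((5 - (e + 1) : Nat) : Int)).getD 0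
          = (szW e : Int) := by
        interval_cases e <;> decide
      rw [hstart, horder, ih e _ hlen' (by omega) hv']
      simp only [rankW]
      push_cast
      ring

-- ===== VERDICT (by name: the statement is the Claim_ definition above) =====
theorem solution_spec : Claim_equal_solution := by
  intro word _ hpre
  unfold Spec_solution solution solution_alt
  rcases hpre with ⟨hlen, hvb⟩
  have hv : ∀ c ∈ word.toList, c ∈ vowelsA := fun c hc => by
    have := List.all_eq_true.mp hvb c hc
    simpa using this
  have hA : solLoopA 0 (PySem.List.enumerate word.toList) = (rankW word.toList 5 : Int) := by
    have := solLoopA_rank word.toList 5 0 hlen (le_refl 5) hv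
    simpa using this
  have hB := index?_genWords 5 [] word.toList hlen hv
  simp only [List.nil_append] at hB
  rw [hA, hB]
  simp
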